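-- pv_equiv track=rewrite | github.com/shakex/sheetocr | data/augmentation.py | _get_list_len_without_overlap
-- ===== SOURCE A (Python) =====
-- from itertools import combinations
--
-- def _get_list_len_without_overlap(word_list):
--     n_overlap = 0
--     for str1, str2 in list(combinations(word_list, 2)):
--         min_len = min(len(str1), len(str2))
--         for i in range(min_len, 0, -1):
--             if str1[-i:] == str2[:i] or str2[-i:] == str1[:i]:
--                 n_overlap += 1
--                 break
--     return len(word_list) - n_overlap
-- ===== SOURCE B (Python) =====
-- def _get_list_len_without_overlap(word_list):
--     affix_sets = [
--         ({w[:i] for i in range(1, len(w) + 1)},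
--          {w[len(w) - i:] for i in range(1, len(w) + 1)})
--         for w in word_list
--     ]
--     n_overlap = 0
--     rest = affix_sets
--     while rest:
--         (p1, s1), rest = rest[0], rest[1:]
--         n_overlap += sum(1 for (p2, s2) in rest if (s1 & p2) or (s2 & p1))
--     return len(word_list) - n_overlap
-- ===== Notes on version B (the rewrite author's own statement) =====
-- stated objective: faster
-- what changed: Instead of comparing slices for each overlap length i per pair with a descending scan, B precomputes each word's set of nonempty prefixes and suffixes once and detects an overlap for a pair by set intersection.
import Mathlib
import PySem

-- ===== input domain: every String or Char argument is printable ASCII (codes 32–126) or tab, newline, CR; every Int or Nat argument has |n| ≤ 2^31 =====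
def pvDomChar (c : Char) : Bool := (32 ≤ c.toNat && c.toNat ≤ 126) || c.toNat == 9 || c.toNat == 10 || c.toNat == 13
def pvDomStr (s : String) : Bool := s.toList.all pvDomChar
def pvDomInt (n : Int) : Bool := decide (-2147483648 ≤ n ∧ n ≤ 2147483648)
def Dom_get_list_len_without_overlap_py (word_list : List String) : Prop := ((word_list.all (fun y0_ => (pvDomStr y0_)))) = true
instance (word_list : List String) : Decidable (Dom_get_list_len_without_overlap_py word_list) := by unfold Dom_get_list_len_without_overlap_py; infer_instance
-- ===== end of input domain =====

-- B replaces A's per-pair descending scan of slice comparisons by per-word prefix/suffix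
-- sets built once, with overlap detected by set intersection (objective: faster, measured).

-- ===== PORT A =====
-- list(combinations(word_list, 2))
def pyCombinations2 {α : Type} : List α → List (α × α)
  | [] => []
  | x :: xs => xs.map (fun y => (x, y)) ++ pyCombinations2 xs

-- inner 'for i in range(min_len, 0, -1): if …: break' as a first-hit scan
def overlapHitA (s t : List Char) (is : List Int) : Bool :=
  is.any (fun i =>
    decide (PySem.List.slice s (some (-i)) none = PySem.List.slice t none (some i)) ||
    decide (PySem.List.slice t (some (-i)) none = PySem.List.slice s none (some i)))

def get_list_len_without_overlap_py (word_list : List String) : Int :=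
  let n_overlap : Int := (pyCombinations2 word_list).foldl (fun acc p =>
    let min_len : Int := min (PySem.Str.len p.1) (PySem.Str.len p.2)
    if overlapHitA p.1.toList p.2.toList (PySem.List.pyRange min_len 0 (-1)) then acc + 1
    else acc) 0
  (word_list.length : Int) - n_overlap

-- ===== PORT B =====
-- {w[:i] for i in range(1, len(w)+1)}
def prefSet (w : String) : PySem.Set (List Char) :=
  PySem.Set.ofList ((PySem.List.pyRange 1 (PySem.Str.len w + 1) 1).map
    (fun i => PySem.List.slice w.toList none (some i)))

-- {w[len(w)-i:] for i in range(1, len(w)+1)}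
def sufSet (w : String) : PySem.Set (List Char) :=
  PySem.Set.ofList ((PySem.List.pyRange 1 (PySem.Str.len w + 1) 1).map
    (fun i => PySem.List.slice w.toList (some (PySem.Str.len w - i)) none))

-- '(s1 & p2) or (s2 & p1)' — Python truthiness of a set is nonemptiness
def overlapHitB (q r : PySem.Set (List Char) × PySem.Set (List Char)) : Bool :=
  !(PySem.Set.inter q.2 r.1).isEmpty || !(PySem.Set.inter r.2 q.1).isEmpty

-- the 'while rest:' loop; 'sum(1 for … if cond)' is countP
def countOverlap : List (PySem.Set (List Char) × PySem.Set (List Char)) → Int → Int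
  | [], acc => acc
  | q :: rest, acc => countOverlap rest (acc + (rest.countP (fun r => overlapHitB q r) : Int))

def get_list_len_without_overlap_py_alt (word_list : List String) : Int :=
  let affix_sets := word_list.map (fun w => (prefSet w, sufSet w))
  (word_list.length : Int) - countOverlap affix_sets 0

-- ===== PRECONDITION & SPEC =====
def Spec_get_list_len_without_overlap_py (word_list : List String) (out : Int) : Prop := out = get_list_len_without_overlap_py_alt word_list
instance (word_list : List String) (out : Int) : Decidable (Spec_get_list_len_without_overlap_py word_list out) := by unfold Spec_get_list_len_without_overlap_py; infer_instance

-- ===== CLAIM (what is proved, stated in full; the proofs are below) =====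
def Claim_equal_get_list_len_without_overlap_py : Prop := ∀ (word_list : List String), Dom_get_list_len_without_overlap_py word_list → Spec_get_list_len_without_overlap_py word_list (get_list_len_without_overlap_py word_list)

-- ===== LEMMAS AND PROOFS =====

lemma mem_prefSet (t : String) (x : List Char) :
    x ∈ prefSet t ↔ ∃ k : Nat, 1 ≤ k ∧ k ≤ t.toList.length ∧ x = t.toList.take k := by
  unfold prefSet
  simp only [PySem.Set.mem_ofList, List.mem_map, PySem.List.mem_pyRange_one, PySem.Str.len_eq]
  constructor
  · rintro ⟨i, ⟨h1, h2⟩, rfl⟩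
    refine ⟨i.toNat, by omega, by omega, ?_⟩
    rw [PySem.List.slice_to _ (by omega)]
  · rintro ⟨k, hk1, hk2, rfl⟩
    exact ⟨(k : Int), ⟨by omega, by omega⟩, by rw [PySem.List.slice_to_natCast]⟩

lemma mem_sufSet (s : String) (x : List Char) :
    x ∈ sufSet s ↔ ∃ k : Nat, 1 ≤ k ∧ k ≤ s.toList.length ∧ x = s.toList.drop (s.toList.length - k) := by
  unfold sufSet
  simp only [PySem.Set.mem_ofList, List.mem_map, PySem.List.mem_pyRange_one, PySem.Str.len_eq]
  constructor
  · rintro ⟨i, ⟨h1, h2⟩, rfl⟩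
    refine ⟨i.toNat, by omega, by omega, ?_⟩
    rw [PySem.List.slice_from _ (by omega)]
    congr 1
    omega
  · rintro ⟨k, hk1, hk2, rfl⟩
    refine ⟨(k : Int), ⟨by omega, by omega⟩, ?_⟩
    rw [PySem.List.slice_from _ (by omega)]
    congr 1
    omega

lemma inter_nonempty_iff (s t : String) :
    (!(PySem.Set.inter (sufSet s) (prefSet t)).isEmpty) = true ↔
    ∃ k : Nat, 1 ≤ k ∧ k ≤ s.toList.length ∧ k ≤ t.toList.length ∧
      s.toList.drop (s.toList.length - k) = t.toList.take k := by
  rw [Bool.not_eq_eq_eq_not, Bool.not_true, List.isEmpty_eq_false_iff_exists_mem]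
  constructor
  · rintro ⟨x, hx⟩
    rw [PySem.Set.mem_inter] at hx
    obtain ⟨hs, ht⟩ := hx
    obtain ⟨k, hk1, hk2, rfl⟩ := (mem_sufSet s x).mp hs
    obtain ⟨j, hj1, hj2, hEq⟩ := (mem_prefSet t _).mp ht
    have hlen : k = j := by
      have h1 := congrArg List.length hEq
      rw [List.length_drop, List.length_take] at h1
      omega
    exact ⟨k, hk1, hk2, by omega, by rw [hEq, hlen]⟩
  · rintro ⟨k, hk1, hk2, hk3, hEq⟩
    refine ⟨s.toList.drop (s.toList.length - k), ?_⟩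
    rw [PySem.Set.mem_inter]
    exact ⟨(mem_sufSet s _).mpr ⟨k, hk1, hk2, rfl⟩, (mem_prefSet t _).mpr ⟨k, hk1, hk3, hEq⟩⟩

lemma slice_neg_from (cs : List Char) (i : Int) (h : 0 < i) :
    PySem.List.slice cs (some (-i)) none = cs.drop (cs.length - i.toNat) := by
  have hi : i = (i.toNat : Int) := by omega
  rw [hi, PySem.List.slice_from_neg_natCast _ _ (by omega)]
  congr 1

lemma hit_eq (s t : String) :
    overlapHitA s.toList t.toList
      (PySem.List.pyRange (min (PySem.Str.len s) (PySem.Str.len t)) 0 (-1)) =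
    overlapHitB (prefSet s, sufSet s) (prefSet t, sufSet t) := by
  rw [Bool.eq_iff_iff]
  unfold overlapHitA overlapHitB
  rw [List.any_eq_true, Bool.or_eq_true, inter_nonempty_iff, inter_nonempty_iff]
  constructor
  · rintro ⟨i, hmem, hcond⟩
    rw [PySem.List.mem_pyRange_neg_one] at hmem
    obtain ⟨h0, hle⟩ := hmem
    simp only [PySem.Str.len_eq, le_min_iff] at hle
    rw [Bool.or_eq_true, decide_eq_true_iff, decide_eq_true_iff,
        slice_neg_from _ _ h0, slice_neg_from _ _ h0,
        PySem.List.slice_to _ (by omega), PySem.List.slice_to _ (by omega)] at hcond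
    rcases hcond with h | h
    · exact Or.inl ⟨i.toNat, by omega, by omega, by omega, h⟩
    · exact Or.inr ⟨i.toNat, by omega, by omega, by omega, h⟩
  · rintro (⟨k, hk1, hk2, hk3, hEq⟩ | ⟨k, hk1, hk2, hk3, hEq⟩)
    · refine ⟨(k : Int), ?_, ?_⟩
      · rw [PySem.List.mem_pyRange_neg_one]
        simp only [PySem.Str.len_eq, le_min_iff]
        omega
      · rw [Bool.or_eq_true, decide_eq_true_iff, decide_eq_true_iff,
            slice_neg_from _ _ (by omega), slice_neg_from _ _ (by omega),
            PySem.List.slice_to _ (by omega), PySem.List.slice_to _ (by omega)]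
        left; simpa using hEq
    · refine ⟨(k : Int), ?_, ?_⟩
      · rw [PySem.List.mem_pyRange_neg_one]
        simp only [PySem.Str.len_eq, le_min_iff]
        omega
      · rw [Bool.or_eq_true, decide_eq_true_iff, decide_eq_true_iff,
            slice_neg_from _ _ (by omega), slice_neg_from _ _ (by omega),
            PySem.List.slice_to _ (by omega), PySem.List.slice_to _ (by omega)]
        right; simpa using hEq

lemma foldl_count (P : String × String → Bool) (l : List (String × String)) (acc : Int) :
    l.foldl (fun a p => if P p then a + 1 else a) acc = acc + (l.countP P : Int) := by
  induction l generalizing acc with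
  | nil => simp
  | cons p l ih =>
    simp only [List.foldl_cons, List.countP_cons, ih]
    by_cases h : P p = true
    · simp [h]
      ring
    · simp [h]

lemma countOverlap_eq (xs : List String) (acc : Int) :
    countOverlap (xs.map (fun w => (prefSet w, sufSet w))) acc
      = acc + ((pyCombinations2 xs).countP (fun p =>
          overlapHitA p.1.toList p.2.toList
            (PySem.List.pyRange (min (PySem.Str.len p.1) (PySem.Str.len p.2)) 0 (-1))) : Int) := by
  induction xs generalizing acc with
  | nil => simp [countOverlap, pyCombinations2]
  | cons x xs ih =>
    simp only [List.map_cons, countOverlap, pyCombinations2, List.countP_append, ih,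
      List.countP_map]
    have hc : (xs.countP (fun r => overlapHitB (prefSet x, sufSet x) (prefSet r, sufSet r)))
        = xs.countP (fun y => overlapHitA x.toList y.toList
            (PySem.List.pyRange (min (PySem.Str.len x) (PySem.Str.len y)) 0 (-1))) := by
      apply List.countP_congr
      intro y _
      have h := hit_eq x y
      simp only [PySem.Str.len_eq] at h ⊢
      rw [h]
    simp only [Function.comp_def] at *
    rw [hc]
    push_cast
    ring

-- ===== VERDICT (by name: the statement is the Claim_ definition above) =====
theorem get_list_len_without_overlap_py_spec : Claim_equal_get_list_len_without_overlap_py := by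
  intro word_list _
  unfold Spec_get_list_len_without_overlap_py
  unfold get_list_len_without_overlap_py get_list_len_without_overlap_py_alt
  simp only [foldl_count, countOverlap_eq, zero_add]
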